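-- pv_equiv track=rewrite | github.com/jcmgray/cotengra | cotengra/pathfinders/path_basic.py | compute_simplified
-- ===== SOURCE A (Python) =====
-- def compute_simplified(legs, appearances):
--     """Compute the diag and reduced legs of a term. This function assumes that
--     the legs are already sorted. It handles the case where a index is both
--     diag and reduced (i.e. traced).
--     """
--     if not legs:
--         return []
--
--     new_legs = []
--     cur_ix, cur_cnt = legs[0]
--     for ix, ix_cnt in legs[1:]:
--         if ix == cur_ix:
--             # diag index-> accumulate count and continue
--             cur_cnt += ix_cnt
--         else:
--             # index changed, flush
--             if cur_cnt != appearances[cur_ix]: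
--                 # index is not reduced -> keep
--                 new_legs.append((cur_ix, cur_cnt))
--             cur_ix, cur_cnt = ix, ix_cnt
--
--     if cur_cnt != appearances[cur_ix]:
--         new_legs.append((cur_ix, cur_cnt))
--
--     return new_legs
-- ===== SOURCE B (Python) =====
-- def compute_simplified(legs, appearances):
--     """Staged index-arithmetic pipeline: find run-boundary positions in the
--     sorted legs, pair consecutive boundaries into (start, end) slices, sum
--     each slice's counts, and keep runs whose total differs from appearances."""
--     n = len(legs)
--     starts = [i for i in range(n) if i == 0 or legs[i][0] != legs[i - 1][0]]
--     out = []
--     for s, e in zip(starts, starts[1:] + [n]):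
--         ix = legs[s][0]
--         total = sum(c for _, c in legs[s:e])
--         if total != appearances[ix]:
--             out.append((ix, total))
--     return out
-- ===== Notes on version B (the rewrite author's own statement) =====
-- stated objective: alternative
-- what changed: Replaces A's single-pass running cur_ix/cur_cnt accumulator (with its duplicated flush) by a staged index-arithmetic pipeline: compute the run-boundary positions, zip consecutive boundaries into (start,end) pairs, sum each slice by index, then filter against appearances.
import Mathlib
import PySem

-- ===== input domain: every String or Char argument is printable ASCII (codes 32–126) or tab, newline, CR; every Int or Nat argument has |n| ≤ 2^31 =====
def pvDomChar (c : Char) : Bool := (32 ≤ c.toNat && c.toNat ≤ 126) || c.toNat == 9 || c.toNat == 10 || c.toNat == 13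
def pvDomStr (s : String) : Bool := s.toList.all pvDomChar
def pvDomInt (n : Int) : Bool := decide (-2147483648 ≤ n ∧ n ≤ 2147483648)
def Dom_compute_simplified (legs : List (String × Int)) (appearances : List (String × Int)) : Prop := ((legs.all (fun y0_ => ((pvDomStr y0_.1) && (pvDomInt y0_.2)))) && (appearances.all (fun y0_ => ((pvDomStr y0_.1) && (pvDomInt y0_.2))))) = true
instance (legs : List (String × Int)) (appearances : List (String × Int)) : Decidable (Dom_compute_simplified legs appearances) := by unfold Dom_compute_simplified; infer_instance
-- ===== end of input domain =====

-- B replaces A's running cur_ix/cur_cnt accumulator (with its duplicated flush) by a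
-- staged index-arithmetic pipeline: boundary positions -> (start,end) pairs -> slice sums;
-- return values agree on Pre_.

-- dict lookup appearances[k]: first match in the association list (default never reached under Pre_)
def appGetD (appearances : List (String × Int)) (k : String) : Int :=
  ((appearances.find? (fun q => q.1 == k)).map Prod.snd).getD 0

-- ===== PORT A =====
def compute_simplified (legs : List (String × Int)) (appearances : List (String × Int)) : List (String × Int) :=
  match legs with
  | [] => []
  | (ix0, c0) :: rest =>
    let s := rest.foldl
      (fun (s : List (String × Int) × String × Int) p =>
        if p.1 == s.2.1 then
          (s.1, s.2.1, s.2.2 + p.2)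
        else
          (if s.2.2 ≠ appGetD appearances s.2.1 then s.1 ++ [(s.2.1, s.2.2)] else s.1, p.1, p.2))
      ([], ix0, c0)
    if s.2.2 ≠ appGetD appearances s.2.1 then s.1 ++ [(s.2.1, s.2.2)] else s.1

-- ===== PORT B =====
-- Source B's boundary test `i == 0 or legs[i][0] != legs[i-1][0]` (at i = 0 the `or` is
-- already true, so the value agrees with Python's short-circuit, which never reads legs[-1])
def bnd (legs : List (String × Int)) (i : Nat) : Bool :=
  decide (i = 0) || !((legs.getD i ("", 0)).1 == (legs.getD (i - 1) ("", 0)).1)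

-- starts = [i for i in range(n) if i == 0 or legs[i][0] != legs[i-1][0]]  (all indices in range)
def startsOf (legs : List (String × Int)) : List Nat :=
  (List.range legs.length).filter (bnd legs)

-- ix = legs[s][0]; total = sum(c for _, c in legs[s:e]).  Since 0 ≤ s ≤ e ≤ n here,
-- the Python slice legs[s:e] is exactly (legs.drop s).take (e - s).
def runEntry (legs : List (String × Int)) (se : Nat × Nat) : String × Int :=
  ((legs.getD se.1 ("", 0)).1, (((legs.drop se.1).take (se.2 - se.1)).map Prod.snd).sum)

def compute_simplified_alt (legs : List (String × Int)) (appearances : List (String × Int)) : List (String × Int) :=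
  let starts := startsOf legs
  (starts.zip (starts.drop 1 ++ [legs.length])).foldl
    (fun out se =>
      let e := runEntry legs se
      if e.2 ≠ appGetD appearances e.1 then out ++ [e] else out) []

-- ===== PRECONDITION & SPEC =====
-- Pre_ excludes exactly the inputs where Python A raises KeyError (a leg index missing
-- from appearances); B raises KeyError there too.
def Pre_compute_simplified (legs : List (String × Int)) (appearances : List (String × Int)) : Prop :=
  ∀ p ∈ legs, ∃ q ∈ appearances, q.1 = p.1
instance (legs : List (String × Int)) (appearances : List (String × Int)) : Decidable (Pre_compute_simplified legs appearances) := by unfold Pre_compute_simplified; infer_instance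
def pvWitness_compute_simplified : (List (String × Int)) × (List (String × Int)) :=
  ([("a", 1), ("a", 1), ("b", 2)], [("a", 2), ("b", 3)])

def Spec_compute_simplified (legs : List (String × Int)) (appearances : List (String × Int)) (out : List (String × Int)) : Prop := out = compute_simplified_alt legs appearances
instance (legs : List (String × Int)) (appearances : List (String × Int)) (out : List (String × Int)) : Decidable (Spec_compute_simplified legs appearances out) := by unfold Spec_compute_simplified; infer_instance

-- ===== CLAIM (what is proved, stated in full; the proofs are below) =====
def Claim_equal_compute_simplified : Prop := ∀ (legs : List (String × Int)) (appearances : List (String × Int)), Dom_compute_simplified legs appearances → Pre_compute_simplified legs appearances → Spec_compute_simplified legs appearances (compute_simplified legs appearances)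

-- ===== LEMMAS AND PROOFS =====

-- proof-only middle form: run-length grouping of the legs (each maximal run of equal
-- indices becomes one (ix, sum-of-counts) pair); both ports are shown equal to its filter
def groupSums : List (String × Int) → List (String × Int)
  | [] => []
  | (ix, c) :: rest =>
    let sp := rest.span (fun p => p.1 == ix)
    (ix, c + (sp.1.map Prod.snd).sum) :: groupSums sp.2
termination_by l => l.length
decreasing_by
  simp only [List.span_eq_takeWhile_dropWhile, List.length_cons]
  exact Nat.lt_succ_of_le (List.length_dropWhile_le _ _)

theorem groupSums_cons_same (ix : String) (cc c : Int) (rest : List (String × Int)) :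
    groupSums ((ix, cc) :: (ix, c) :: rest) = groupSums ((ix, cc + c) :: rest) := by
  rw [groupSums, groupSums]
  simp only [List.span_eq_takeWhile_dropWhile, List.takeWhile_cons, List.dropWhile_cons,
    beq_self_eq_true, if_true, List.map_cons, List.sum_cons]
  rw [← add_assoc]

theorem groupSums_cons_ne (ix jx : String) (cc c : Int) (rest : List (String × Int))
    (h : jx ≠ ix) :
    groupSums ((ix, cc) :: (jx, c) :: rest) =
      (ix, cc) :: groupSums ((jx, c) :: rest) := by
  have hb : (jx == ix) = false := beq_eq_false_iff_ne.mpr h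
  rw [groupSums]
  simp [List.span_eq_takeWhile_dropWhile, hb]

-- A side: the fold-with-final-flush over rest starting from (nl, cix, cc)
-- equals nl ++ the filtered group sums of (cix, cc) :: rest
theorem main_inv (app : List (String × Int)) (rest : List (String × Int)) :
    ∀ (nl : List (String × Int)) (cix : String) (cc : Int),
    (let s := rest.foldl
      (fun (s : List (String × Int) × String × Int) p =>
        if p.1 == s.2.1 then
          (s.1, s.2.1, s.2.2 + p.2)
        else
          (if s.2.2 ≠ appGetD app s.2.1 then s.1 ++ [(s.2.1, s.2.2)] else s.1, p.1, p.2))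
      (nl, cix, cc)
     if s.2.2 ≠ appGetD app s.2.1 then s.1 ++ [(s.2.1, s.2.2)] else s.1)
    = nl ++ (groupSums ((cix, cc) :: rest)).filter (fun p => p.2 ≠ appGetD app p.1) := by
  induction rest with
  | nil =>
    intro nl cix cc
    rw [groupSums]
    by_cases h : cc = appGetD app cix <;> simp [h, List.filter, groupSums]
  | cons hd tl ih =>
    intro nl cix cc
    obtain ⟨jx, c⟩ := hd
    by_cases h : jx = cix
    · subst h
      simp only [List.foldl_cons, if_pos (beq_self_eq_true jx)]
      rw [ih nl jx (cc + c), groupSums_cons_same]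
    · have hb : (jx == cix) = false := beq_eq_false_iff_ne.mpr h
      simp only [List.foldl_cons, hb, if_false, Bool.false_eq_true]
      rw [ih _ jx c, groupSums_cons_ne _ _ _ _ _ h]
      by_cases hk : cc = appGetD app cix <;>
        simp [List.filter, hk]

-- B side -----------------------------------------------------------------

def runPairs (legs : List (String × Int)) : List (Nat × Nat) :=
  (startsOf legs).zip ((startsOf legs).drop 1 ++ [legs.length])

theorem alt_eq_filter (legs app : List (String × Int)) :
    compute_simplified_alt legs app =
      ((runPairs legs).map (runEntry legs)).filter
        (fun p => decide (p.2 ≠ appGetD app p.1)) := by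
  unfold compute_simplified_alt runPairs
  rw [PySem.List.foldl_append_ite
        (fun se => (runEntry legs se).2 ≠ appGetD app (runEntry legs se).1)
        (runEntry legs)]
  rw [List.filter_map]
  rfl

theorem getD_drop {α : Type} (l : List α) (m a : Nat) (d : α) :
    (l.drop m).getD a d = l.getD (m + a) d := by
  simp [List.getD_eq_getElem?_getD, List.getElem?_drop]

theorem fst_getD_run (ix : String) (c : Int) (t : List (String × Int)) (i : Nat)
    (hi : i ≤ (t.takeWhile (fun p => p.1 == ix)).length) :
    ((((ix, c) :: t).getD i ("", 0)).1) = ix := by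
  cases i with
  | zero => rfl
  | succ j =>
    rw [List.getD_cons_succ]
    have hj : j < (t.takeWhile (fun p => p.1 == ix)).length := hi
    conv_lhs => rw [← List.takeWhile_append_dropWhile (p := fun p => p.1 == ix) (l := t),
      List.getD_append _ _ _ _ hj]
    have hmem : (t.takeWhile (fun p => p.1 == ix)).getD j ("", 0)
        ∈ t.takeWhile (fun p => p.1 == ix) := by
      rw [List.getD_eq_getElem _ _ hj]; exact List.getElem_mem hj
    have hx := List.mem_takeWhile_imp hmem
    exact eq_of_beq hx

theorem drop_run (ix : String) (c : Int) (t : List (String × Int)) :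
    ((ix, c) :: t).drop ((t.takeWhile (fun p => p.1 == ix)).length + 1)
      = t.dropWhile (fun p => p.1 == ix) := by
  rw [List.drop_succ_cons]
  have h := List.drop_left (l₁ := t.takeWhile (fun p => p.1 == ix))
    (l₂ := t.dropWhile (fun p => p.1 == ix))
  rwa [List.takeWhile_append_dropWhile] at h

theorem startsOf_ne_nil (l : List (String × Int)) (h : l ≠ []) :
    startsOf l = 0 :: ((List.range (l.length - 1)).map Nat.succ).filter (bnd l) := by
  unfold startsOf
  cases l with
  | nil => exact absurd rfl h
  | cons a t =>
    rw [List.length_cons, List.range_succ_eq_map]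
    simp [bnd]

theorem startsOf_cons (ix : String) (c : Int) (t : List (String × Int)) :
    startsOf ((ix, c) :: t)
      = 0 :: (startsOf (t.dropWhile (fun p => p.1 == ix))).map
          (fun j => (t.takeWhile (fun p => p.1 == ix)).length + 1 + j) := by
  set q : (String × Int) → Bool := fun p => p.1 == ix with hq
  set run := t.takeWhile q with hrun
  set rest := t.dropWhile q with hrest
  set k := run.length with hk
  have htlen : t.length = run.length + rest.length := by
    rw [hrun, hrest, ← List.length_append, List.takeWhile_append_dropWhile]
  have hlen : ((ix, c) :: t).length = (k + 1) + rest.length := by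
    simp [htlen, hk]; omega
  unfold startsOf
  rw [hlen, List.range_add, List.filter_append]
  have h1 : (List.range (k + 1)).filter (bnd ((ix, c) :: t)) = [0] := by
    rw [List.range_succ_eq_map, List.filter_cons]
    have h0 : bnd ((ix, c) :: t) 0 = true := by simp [bnd]
    rw [if_pos h0]
    congr 1
    rw [List.filter_eq_nil_iff]
    intro a ha
    obtain ⟨i, hi, rfl⟩ := List.mem_map.mp ha
    have hik : i < k := List.mem_range.mp hi
    have hb1 : Nat.succ i ≤ (t.takeWhile (fun p => p.1 == ix)).length := by
      rw [← hq, ← hrun, ← hk]; omega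
    have hb2 : i ≤ (t.takeWhile (fun p => p.1 == ix)).length := by
      rw [← hq, ← hrun, ← hk]; omega
    have e1 : ((((ix, c) :: t).getD (Nat.succ i) ("", 0)).1) = ix :=
      fst_getD_run ix c t _ hb1
    have e2 : ((((ix, c) :: t).getD (Nat.succ i - 1) ("", 0)).1) = ix := by
      rw [Nat.succ_sub_one]; exact fst_getD_run ix c t _ hb2
    unfold bnd
    rw [e1, e2]
    simp
  have hdrop : ((ix, c) :: t).drop (k + 1) = rest := drop_run ix c t
  have hgd : ∀ a : Nat, (((ix, c) :: t).getD (k + 1 + a) ("", 0)) = rest.getD a ("", 0) := by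
    intro a
    rw [← getD_drop, hdrop]
  have h2 : (List.map (fun x => k + 1 + x) (List.range rest.length)).filter
        (bnd ((ix, c) :: t))
      = (startsOf rest).map (fun j => k + 1 + j) := by
    rw [List.filter_map]
    unfold startsOf
    congr 1
    apply List.filter_congr
    intro j hj
    have hjr : j < rest.length := List.mem_range.mp hj
    show bnd ((ix, c) :: t) (k + 1 + j) = bnd rest j
    cases j with
    | zero =>
      have e2 : ((((ix, c) :: t).getD (k + 1 + 0 - 1) ("", 0)).1) = ix := by
        have he : k + 1 + 0 - 1 = k := by omega
        rw [he]
        have hb : k ≤ (t.takeWhile (fun p => p.1 == ix)).length := by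
          rw [← hq, ← hrun, ← hk]
        exact fst_getD_run ix c t k hb
      have hhead : ((rest.getD 0 ("", 0)).1 == ix) = false := by
        have hne : rest ≠ [] := by
          intro h; rw [h] at hjr; simp at hjr
        obtain ⟨r0, rt, hr⟩ := List.exists_cons_of_ne_nil hne
        have hdw : List.dropWhile q t = r0 :: rt := by rw [← hrest, hr]
        have hp := List.head_dropWhile_not q (l := t) (by rw [hdw]; simp)
        simp only [hdw] at hp
        have hq0 : q r0 = false := by simpa using hp
        rw [hr, List.getD_cons_zero]
        simpa [hq] using hq0
      unfold bnd
      rw [hgd 0, e2, hhead]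
      simp
    | succ j' =>
      have e1 : (((ix, c) :: t).getD (k + 1 + (j' + 1)) ("", 0)) = rest.getD (j' + 1) ("", 0) := hgd _
      have e2 : (((ix, c) :: t).getD (k + 1 + (j' + 1) - 1) ("", 0)) = rest.getD (j' + 1 - 1) ("", 0) := by
        have he : k + 1 + (j' + 1) - 1 = k + 1 + j' := by omega
        have he2 : j' + 1 - 1 = j' := by omega
        rw [he, he2, hgd]
      unfold bnd
      rw [e1, e2]
      simp
  rw [h1, h2]
  rfl

theorem runEntry_shift (ix : String) (c : Int) (t : List (String × Int)) (a b : Nat) :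
    runEntry ((ix, c) :: t)
        ((t.takeWhile (fun p => p.1 == ix)).length + 1 + a,
         (t.takeWhile (fun p => p.1 == ix)).length + 1 + b)
      = runEntry (t.dropWhile (fun p => p.1 == ix)) (a, b) := by
  have hdrop : ((ix, c) :: t).drop ((t.takeWhile (fun p => p.1 == ix)).length + 1)
      = t.dropWhile (fun p => p.1 == ix) := drop_run ix c t
  unfold runEntry
  have h1 : ((ix, c) :: t).getD ((t.takeWhile (fun p => p.1 == ix)).length + 1 + a) ("", 0)
      = (t.dropWhile (fun p => p.1 == ix)).getD a ("", 0) := by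
    rw [← getD_drop, hdrop]
  have h2 : ((ix, c) :: t).drop ((t.takeWhile (fun p => p.1 == ix)).length + 1 + a)
      = (t.dropWhile (fun p => p.1 == ix)).drop a := by
    rw [← hdrop, List.drop_drop, Nat.add_comm]
  have h3 : (t.takeWhile (fun p => p.1 == ix)).length + 1 + b
      - ((t.takeWhile (fun p => p.1 == ix)).length + 1 + a) = b - a := by omega
  simp only [h1, h2, h3]

theorem runEntry_head (ix : String) (c : Int) (t : List (String × Int)) :
    runEntry ((ix, c) :: t) (0, (t.takeWhile (fun p => p.1 == ix)).length + 1)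
      = (ix, c + ((t.takeWhile (fun p => p.1 == ix)).map Prod.snd).sum) := by
  unfold runEntry
  have htake : t.take (t.takeWhile (fun p => p.1 == ix)).length
      = t.takeWhile (fun p => p.1 == ix) := by
    have h := List.take_left (l₁ := t.takeWhile (fun p => p.1 == ix))
      (l₂ := t.dropWhile (fun p => p.1 == ix))
    rwa [List.takeWhile_append_dropWhile] at h
  simp [htake]

theorem zip_cons_head {S : List Nat} {n : Nat} :
    (0 :: S).zip (S ++ [n]) = (0, S.headD n) :: S.zip (S.drop 1 ++ [n]) := by
  cases S <;> simp

theorem mapRuns (legs : List (String × Int)) :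
    (runPairs legs).map (runEntry legs) = groupSums legs := by
  induction legs using groupSums.induct with
  | case1 => simp [runPairs, startsOf, groupSums]
  | case2 ix c t sp ih =>
    simp only [sp, List.span_eq_takeWhile_dropWhile] at ih
    clear sp
    have hlen : ((ix, c) :: t).length
        = (t.takeWhile (fun p => p.1 == ix)).length + 1
          + (t.dropWhile (fun p => p.1 == ix)).length := by
      have h := List.length_append (as := t.takeWhile (fun p => p.1 == ix))
        (bs := t.dropWhile (fun p => p.1 == ix))
      rw [List.takeWhile_append_dropWhile] at h
      simp [h]
      omega
    rw [runPairs, startsOf_cons, hlen, List.drop_succ_cons, List.drop_zero, zip_cons_head]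
    -- the first boundary pair is always (0, k+1)
    have hhead : (((startsOf (t.dropWhile (fun p => p.1 == ix))).map
          (fun j => (t.takeWhile (fun p => p.1 == ix)).length + 1 + j)).headD
            ((t.takeWhile (fun p => p.1 == ix)).length + 1
              + (t.dropWhile (fun p => p.1 == ix)).length))
        = (t.takeWhile (fun p => p.1 == ix)).length + 1 := by
      cases hr : t.dropWhile (fun p => p.1 == ix) with
      | nil => simp [startsOf]
      | cons r0 rt =>
        rw [startsOf_ne_nil (r0 :: rt) (by simp)]
        simp
    rw [hhead]
    -- the remaining pairs are the shifted pairs of the dropped-run remainder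
    have htail : ((startsOf (t.dropWhile (fun p => p.1 == ix))).map
            (fun j => (t.takeWhile (fun p => p.1 == ix)).length + 1 + j)).zip
          ((((startsOf (t.dropWhile (fun p => p.1 == ix))).map
            (fun j => (t.takeWhile (fun p => p.1 == ix)).length + 1 + j)).drop 1)
            ++ [(t.takeWhile (fun p => p.1 == ix)).length + 1
                 + (t.dropWhile (fun p => p.1 == ix)).length])
        = (runPairs (t.dropWhile (fun p => p.1 == ix))).map
            (Prod.map (fun j => (t.takeWhile (fun p => p.1 == ix)).length + 1 + j)
                      (fun j => (t.takeWhile (fun p => p.1 == ix)).length + 1 + j)) := by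
      rw [runPairs, ← List.map_drop]
      have hn : [(t.takeWhile (fun p => p.1 == ix)).length + 1
            + (t.dropWhile (fun p => p.1 == ix)).length]
          = [(t.dropWhile (fun p => p.1 == ix)).length].map
              (fun j => (t.takeWhile (fun p => p.1 == ix)).length + 1 + j) := by simp
      rw [hn, ← List.map_append, List.zip_map]
    rw [htail]
    rw [List.map_cons, List.map_map]
    have hcomp : List.map
          (runEntry ((ix, c) :: t) ∘
            Prod.map (fun j => (t.takeWhile (fun p => p.1 == ix)).length + 1 + j)
                     (fun j => (t.takeWhile (fun p => p.1 == ix)).length + 1 + j))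
          (runPairs (t.dropWhile (fun p => p.1 == ix)))
        = List.map (runEntry (t.dropWhile (fun p => p.1 == ix)))
            (runPairs (t.dropWhile (fun p => p.1 == ix))) := by
      apply List.map_congr_left
      rintro ⟨a, b⟩ _
      exact runEntry_shift ix c t a b
    rw [hcomp, ih, runEntry_head]
    rw [groupSums]
    simp [List.span_eq_takeWhile_dropWhile]

-- ===== VERDICT (by name: the statement is the Claim_ definition above) =====
theorem compute_simplified_spec : Claim_equal_compute_simplified := by
  intro legs app _ _
  unfold Spec_compute_simplified
  rw [alt_eq_filter, mapRuns]
  cases legs with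
  | nil => simp [compute_simplified, groupSums]
  | cons hd rest =>
    obtain ⟨ix0, c0⟩ := hd
    simpa [compute_simplified] using main_inv app rest [] ix0 c0
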